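-- pv_equiv track=rewrite | github.com/gorkaerana/advent-of-code | 2024/day04.py | count_word_crosses
-- ===== SOURCE A (Python) =====
-- def count_word_crosses(word_search: list[list[str]], word: str):
--     word_length = len(word)
--     n_occurrences = 0
--     for row_no in range(0, len(word_search) - word_length + 1):
--         for col_no in range(0, len(word_search[0]) - word_length + 1):
--             square = [[word_search[row_no + r][col_no + c] for c in range(0, word_length)] for r in range(0, word_length)]
--             diag1 = [square[i][i] for i in range(0, word_length)]
--             diag2 = [square[r][c] for r, c in zip(range(word_length), range(word_length - 1, -1, -1))]
--             if (
--                     ("".join(diag1) == word and "".join(diag2) == word)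
--                     or ("".join(reversed(diag1)) == word and "".join(diag2) == word)
--                     or ("".join(diag1) == word and "".join(reversed(diag2)) == word)
--                     or ("".join(reversed(diag1)) == word and "".join(reversed(diag2)) == word)
--             ):
--                 n_occurrences += 1
--     return n_occurrences
-- ===== SOURCE B (Python) =====
-- def count_word_crosses(word_search: list[list[str]], word: str):
--     word_length = len(word)
--     n_rows = len(word_search)
--     if n_rows - word_length + 1 <= 0:
--         return 0
--     n_cols = len(word_search[0])
--
--     def diag_ok(cells):
--         return "".join(cells) == word or "".join(reversed(cells)) == word
--
--     # Precomputed boolean tables: for each window top-left (r, c),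
--     # whether the down-right / down-left diagonal spells word forwards or backwards.
--     dr = [[diag_ok([word_search[r + i][c + i] for i in range(word_length)])
--            for c in range(n_cols - word_length + 1)]
--           for r in range(n_rows - word_length + 1)]
--     dl = [[diag_ok([word_search[r + i][c + word_length - 1 - i] for i in range(word_length)])
--            for c in range(n_cols - word_length + 1)]
--           for r in range(n_rows - word_length + 1)]
--
--     n_occurrences = 0
--     for r in range(n_rows - word_length + 1):
--         dr_row, dl_row = dr[r], dl[r]
--         for c in range(n_cols - word_length + 1):
--             if dr_row[c] and dl_row[c]:
--                 n_occurrences += 1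
--     return n_occurrences
-- ===== Notes on version B (the rewrite author's own statement) =====
-- stated objective: alternative
-- what changed: B precomputes two boolean tables (down-right / down-left diagonal spells word forwards or backwards, per window position) in one scan each, then counts windows where both hold, instead of materialising an L×L square and rescanning it per window with a four-way OR.
import Mathlib
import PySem

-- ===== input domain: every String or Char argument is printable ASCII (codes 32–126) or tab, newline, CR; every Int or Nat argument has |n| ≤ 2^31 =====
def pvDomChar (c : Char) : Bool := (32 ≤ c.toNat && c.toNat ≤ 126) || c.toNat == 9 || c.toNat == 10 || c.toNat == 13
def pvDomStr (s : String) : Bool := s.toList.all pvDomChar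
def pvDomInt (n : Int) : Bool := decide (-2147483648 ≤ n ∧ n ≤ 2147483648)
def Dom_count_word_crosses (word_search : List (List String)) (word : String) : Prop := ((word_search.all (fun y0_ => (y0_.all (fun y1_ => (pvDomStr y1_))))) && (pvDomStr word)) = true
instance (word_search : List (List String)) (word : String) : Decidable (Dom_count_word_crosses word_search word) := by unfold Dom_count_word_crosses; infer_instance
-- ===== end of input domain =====

-- B replaces A's per-window L×L square construction by two precomputed per-diagonal
-- boolean tables combined in one counting pass (objective: alternative decomposition).

-- ===== PORT A =====
def count_word_crosses (word_search : List (List String)) (word : String) : Int :=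
  let L : Int := PySem.Str.len word
  (PySem.List.pyRange 0 ((word_search.length : Int) - L + 1) 1).foldl (fun n row_no =>
    (PySem.List.pyRange 0 (((PySem.List.pyGetD word_search 0 []).length : Int) - L + 1) 1).foldl (fun n col_no =>
      let square : List (List String) := (PySem.List.pyRange 0 L 1).map (fun r =>
        (PySem.List.pyRange 0 L 1).map (fun c =>
          PySem.List.pyGetD (PySem.List.pyGetD word_search (row_no + r) []) (col_no + c) ""))
      let diag1 := (PySem.List.pyRange 0 L 1).map (fun i =>
        PySem.List.pyGetD (PySem.List.pyGetD square i []) i "")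
      let diag2 := ((PySem.List.pyRange 0 L 1).zip (PySem.List.pyRange (L - 1) (-1) (-1))).map (fun rc =>
        PySem.List.pyGetD (PySem.List.pyGetD square rc.1 []) rc.2 "")
      if (PySem.Str.join "" diag1 = word ∧ PySem.Str.join "" diag2 = word)
          ∨ (PySem.Str.join "" diag1.reverse = word ∧ PySem.Str.join "" diag2 = word)
          ∨ (PySem.Str.join "" diag1 = word ∧ PySem.Str.join "" diag2.reverse = word)
          ∨ (PySem.Str.join "" diag1.reverse = word ∧ PySem.Str.join "" diag2.reverse = word)
      then n + 1 else n) n) 0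

-- ===== PORT B =====
def cwcDiagOk (cells : List String) (word : String) : Bool :=
  PySem.Str.join "" cells == word || PySem.Str.join "" cells.reverse == word

def count_word_crosses_alt (word_search : List (List String)) (word : String) : Int :=
  let L : Int := PySem.Str.len word
  let nrows : Int := word_search.length
  if nrows - L + 1 ≤ 0 then 0
  else
    let ncols : Int := (PySem.List.pyGetD word_search 0 []).length
    let dr : List (List Bool) := (PySem.List.pyRange 0 (nrows - L + 1) 1).map (fun r =>
      (PySem.List.pyRange 0 (ncols - L + 1) 1).map (fun c =>
        cwcDiagOk ((PySem.List.pyRange 0 L 1).map (fun i =>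
          PySem.List.pyGetD (PySem.List.pyGetD word_search (r + i) []) (c + i) "")) word))
    let dl : List (List Bool) := (PySem.List.pyRange 0 (nrows - L + 1) 1).map (fun r =>
      (PySem.List.pyRange 0 (ncols - L + 1) 1).map (fun c =>
        cwcDiagOk ((PySem.List.pyRange 0 L 1).map (fun i =>
          PySem.List.pyGetD (PySem.List.pyGetD word_search (r + i) []) (c + L - 1 - i) "")) word))
    (PySem.List.pyRange 0 (nrows - L + 1) 1).foldl (fun n r =>
      let dr_row := PySem.List.pyGetD dr r []
      let dl_row := PySem.List.pyGetD dl r []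
      (PySem.List.pyRange 0 (ncols - L + 1) 1).foldl (fun n c =>
        if PySem.List.pyGetD dr_row c false && PySem.List.pyGetD dl_row c false
        then n + 1 else n) n) 0

-- ===== PRECONDITION & SPEC =====
-- Pre_ excludes exactly the inputs on which the Python A raises IndexError: the empty
-- grid with the empty word (word_search[0] is evaluated), and grids whose window loops
-- run while some row is shorter than the first row (a square cell index out of range).
def Pre_count_word_crosses (word_search : List (List String)) (word : String) : Prop :=
  ¬ ((word_search = [] ∧ word = "")
     ∨ (1 ≤ (word.length : Int)
        ∧ (word.length : Int) ≤ (word_search.length : Int)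
        ∧ (word.length : Int) ≤ ((word_search.headD []).length : Int)
        ∧ ∃ row ∈ word_search, row.length < (word_search.headD []).length))
instance (word_search : List (List String)) (word : String) : Decidable (Pre_count_word_crosses word_search word) := by unfold Pre_count_word_crosses; infer_instance

def pvWitness_count_word_crosses : List (List String) × String := ([["M", "A"], ["B", "M"]], "MM")

def Spec_count_word_crosses (word_search : List (List String)) (word : String) (out : Int) : Prop := out = count_word_crosses_alt word_search word
instance (word_search : List (List String)) (word : String) (out : Int) : Decidable (Spec_count_word_crosses word_search word out) := by unfold Spec_count_word_crosses; infer_instance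

-- ===== CLAIM (what is proved, stated in full; the proofs are below) =====
def Claim_equal_count_word_crosses : Prop := ∀ (word_search : List (List String)) (word : String), Dom_count_word_crosses word_search word → Pre_count_word_crosses word_search word → Spec_count_word_crosses word_search word (count_word_crosses word_search word)

-- ===== LEMMAS AND PROOFS =====

theorem cwc_zip_map {α : Type} (L : Int) (f : Int × Int → α) :
    ((PySem.List.pyRange 0 L 1).zip (PySem.List.pyRange (L-1) (-1) (-1))).map f
      = (PySem.List.pyRange 0 L 1).map (fun i => f (i, L - 1 - i)) := by
  have hrev : PySem.List.pyRange (L-1) (-1) (-1) = (PySem.List.pyRange 0 L 1).reverse := by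
    simpa using PySem.List.pyRange_neg_one_eq_reverse (L-1) (-1)
  apply List.ext_getElem
  · simp [hrev, PySem.List.length_pyRange_one]
  · intro k h1 h2
    have hk : k < (L - 0).toNat := by
      simpa [hrev, PySem.List.length_pyRange_one] using h1
    simp only [List.getElem_map, List.getElem_zip, hrev, List.getElem_reverse,
      PySem.List.getElem_pyRange_one, PySem.List.length_pyRange_one]
    have h3 : (0:Int) + (((L-0).toNat - 1 - k : Nat) : Int) = L - 1 - (0 + (k:Int)) := by omega
    rw [h3]

-- per-window condition equivalence: A's four-way OR is B's per-diagonal test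
theorem cwc_cond_iff (d1 d2 : List String) (w : String) :
    ((PySem.Str.join "" d1 = w ∧ PySem.Str.join "" d2 = w)
      ∨ (PySem.Str.join "" d1.reverse = w ∧ PySem.Str.join "" d2 = w)
      ∨ (PySem.Str.join "" d1 = w ∧ PySem.Str.join "" d2.reverse = w)
      ∨ (PySem.Str.join "" d1.reverse = w ∧ PySem.Str.join "" d2.reverse = w))
      ↔ (cwcDiagOk d1 w && cwcDiagOk d2 w) = true := by
  simp only [cwcDiagOk, Bool.and_eq_true, Bool.or_eq_true, beq_iff_eq]
  tauto

-- ===== VERDICT (by name: the statement is the Claim_ definition above) =====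
theorem count_word_crosses_spec : Claim_equal_count_word_crosses := by
  intro ws w _ _
  unfold Spec_count_word_crosses
  set L : Int := PySem.Str.len w with hL
  by_cases h : (ws.length : Int) - L + 1 ≤ 0
  · simp only [count_word_crosses, count_word_crosses_alt, ← hL, if_pos h,
      PySem.List.pyRange_one_eq_nil (by omega : (ws.length : Int) - L + 1 ≤ (0:Int)), List.foldl_nil]
  · simp only [count_word_crosses, count_word_crosses_alt, ← hL, if_neg h]
    set C : Int := ((PySem.List.pyGetD ws 0 []).length : Int) with hC
    apply PySem.List.foldl_congr_mem
    intro n r hr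
    obtain ⟨hr0, hr1⟩ := (PySem.List.mem_pyRange_one).mp hr
    rw [PySem.List.pyGetD_map_pyRange_of_nonneg _ _ _ _ hr0 hr1,
        PySem.List.pyGetD_map_pyRange_of_nonneg _ _ _ _ hr0 hr1]
    apply PySem.List.foldl_congr_mem
    intro n c hc
    obtain ⟨hc0, hc1⟩ := (PySem.List.mem_pyRange_one).mp hc
    rw [PySem.List.pyGetD_map_pyRange_of_nonneg _ _ _ _ hc0 hc1,
        PySem.List.pyGetD_map_pyRange_of_nonneg _ _ _ _ hc0 hc1]
    -- identify the diagonals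
    have hdiag1 : (PySem.List.pyRange 0 L 1).map (fun i =>
        PySem.List.pyGetD (PySem.List.pyGetD ((PySem.List.pyRange 0 L 1).map (fun r' =>
          (PySem.List.pyRange 0 L 1).map (fun c' =>
            PySem.List.pyGetD (PySem.List.pyGetD ws (r + r') []) (c + c') ""))) i []) i "")
        = (PySem.List.pyRange 0 L 1).map (fun i =>
            PySem.List.pyGetD (PySem.List.pyGetD ws (r + i) []) (c + i) "") := by
      apply List.map_congr_left
      intro i hi
      obtain ⟨hi0, hi1⟩ := (PySem.List.mem_pyRange_one).mp hi
      rw [PySem.List.pyGetD_map_pyRange_of_nonneg _ _ _ _ hi0 hi1,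
          PySem.List.pyGetD_map_pyRange_of_nonneg _ _ _ _ hi0 hi1]
    have hdiag2 : ((PySem.List.pyRange 0 L 1).zip (PySem.List.pyRange (L-1) (-1) (-1))).map (fun rc =>
        PySem.List.pyGetD (PySem.List.pyGetD ((PySem.List.pyRange 0 L 1).map (fun r' =>
          (PySem.List.pyRange 0 L 1).map (fun c' =>
            PySem.List.pyGetD (PySem.List.pyGetD ws (r + r') []) (c + c') ""))) rc.1 []) rc.2 "")
        = (PySem.List.pyRange 0 L 1).map (fun i =>
            PySem.List.pyGetD (PySem.List.pyGetD ws (r + i) []) (c + L - 1 - i) "") := by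
      rw [cwc_zip_map]
      apply List.map_congr_left
      intro i hi
      obtain ⟨hi0, hi1⟩ := (PySem.List.mem_pyRange_one).mp hi
      have hj0 : (0:Int) ≤ L - 1 - i := by omega
      have hj1 : L - 1 - i < L := by omega
      rw [PySem.List.pyGetD_map_pyRange_of_nonneg _ _ _ _ hi0 hi1,
          PySem.List.pyGetD_map_pyRange_of_nonneg _ _ _ _ hj0 hj1]
      congr 1
      omega
    rw [hdiag1, hdiag2]
    rw [if_congr (cwc_cond_iff _ _ w) rfl rfl]
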